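-- pv_equiv track=rewrite | github.com/coreyt429/AdventOfCode | 2015/1/solution.py | solve
-- ===== SOURCE A (Python) =====
-- def solve(input_value, part):
--     """
--     Function to solve puzzle
--     """
--     retval = 0
--     if part == 1:
--         for char in input_value:
--             if char == "(":
--                 retval += 1
--             elif char == ")":
--                 retval -= 1
--         return retval
--     floor = 0
--     for i, char in enumerate(input_value):
--         if char == "(":
--             floor += 1
--         elif char == ")":
--             floor -= 1
--         if floor == -1:
--             retval = i + 1
--             break
--     return retval
-- ===== SOURCE B (Python) =====
-- def solve(input_value, part):
--     """
--     Function to solve puzzle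
--     """
--     if part == 1:
--         return input_value.count("(") - input_value.count(")")
--     # Pair the k-th ")" with the k-th "(": the floor first reaches -1 exactly at
--     # the first ")" whose same-rank "(" is missing or lies after it.
--     opens = [i for i, c in enumerate(input_value) if c == "("]
--     closes = [i for i, c in enumerate(input_value) if c == ")"]
--     for k, i in enumerate(closes):
--         if k >= len(opens) or opens[k] > i:
--             return i + 1
--     return 0
-- ===== Notes on version B (the rewrite author's own statement) =====
-- stated objective: alternative
-- what changed: Part 1 becomes count('(') - count(')'); part 2 keeps no running floor at all: it builds the position lists of '(' and ')' and returns 1 + the first ')' position whose same-rank '(' is missing or lies after it (rank pairing instead of a running balance).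
import Mathlib
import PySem

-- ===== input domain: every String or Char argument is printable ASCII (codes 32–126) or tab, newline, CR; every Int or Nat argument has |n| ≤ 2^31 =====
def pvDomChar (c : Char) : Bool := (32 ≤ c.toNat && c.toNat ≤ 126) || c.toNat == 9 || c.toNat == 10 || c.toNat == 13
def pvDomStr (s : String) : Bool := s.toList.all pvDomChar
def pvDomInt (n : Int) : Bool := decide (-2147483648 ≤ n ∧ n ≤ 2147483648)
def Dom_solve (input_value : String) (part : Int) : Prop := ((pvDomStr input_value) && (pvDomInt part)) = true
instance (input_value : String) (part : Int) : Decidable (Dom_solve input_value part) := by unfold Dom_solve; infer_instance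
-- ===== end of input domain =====

-- B drops A's running-floor loops: part 1 is count('(') - count(')'), part 2 pairs the
-- k-th ')' with the k-th '(' over position lists; objective: alternative, same cost.


-- ===== PORT A =====
-- A's part-2 loop: 'for i, char in enumerate(...)' with early break when floor hits -1
def solveLoopA : List Char → Int → Int → Int
  | [], _, _ => 0
  | c :: rest, i, floor =>
    let floor' := if c = '(' then floor + 1 else if c = ')' then floor - 1 else floor
    if floor' = -1 then i + 1 else solveLoopA rest (i + 1) floor'

def solve (input_value : String) (part : Int) : Int :=
  if part = 1 then
    input_value.toList.foldl
      (fun retval char =>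
        if char = '(' then retval + 1 else if char = ')' then retval - 1 else retval) 0
  else
    solveLoopA input_value.toList 0 0

-- ===== PORT B =====
-- B's part-2 loop: 'for k, i in enumerate(closes): if k >= len(opens) or opens[k] > i: return i+1'
def altLoop (opens : List Int) : List Int → Nat → Int
  | [], _ => 0
  | i :: rest, k =>
    if opens.length ≤ k then i + 1
    else if i < opens.getD k 0 then i + 1
    else altLoop opens rest (k + 1)

def solve_alt (input_value : String) (part : Int) : Int :=
  if part = 1 then
    (PySem.Str.count input_value "(" : Int) - (PySem.Str.count input_value ")" : Int)
  else
    let opens := (PySem.List.enumerate input_value.toList).filterMap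
      (fun ic => if ic.2 = '(' then some ic.1 else none)
    let closes := (PySem.List.enumerate input_value.toList).filterMap
      (fun ic => if ic.2 = ')' then some ic.1 else none)
    altLoop opens closes 0

-- ===== PRECONDITION & SPEC =====
def Spec_solve (input_value : String) (part : Int) (out : Int) : Prop := out = solve_alt input_value part
instance (input_value : String) (part : Int) (out : Int) : Decidable (Spec_solve input_value part out) := by unfold Spec_solve; infer_instance

-- ===== CLAIM (what is proved, stated in full; the proofs are below) =====
def Claim_equal_solve : Prop := ∀ (input_value : String) (part : Int), Dom_solve input_value part → Spec_solve input_value part (solve input_value part)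

-- ===== LEMMAS AND PROOFS =====

-- single-character substring count is List.count
lemma chars_count_singleton (ch : Char) (l : List Char) (fuel acc : Nat)
    (h : l.length ≤ fuel) :
    PySem.Chars.count.go [ch] fuel l acc = acc + l.count ch := by
  induction l generalizing fuel acc with
  | nil => cases fuel <;> simp [PySem.Chars.count.go]
  | cons c t ih =>
    cases fuel with
    | zero => simp at h
    | succ f =>
      simp only [List.length_cons, Nat.succ_le_succ_iff] at h
      by_cases hc : c = ch
      · subst hc
        simp [PySem.Chars.count.go, List.isPrefixOf, ih f (acc + 1) h]
        omega
      · simp [PySem.Chars.count.go, List.isPrefixOf, Ne.symm hc, hc, ih f acc h]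

lemma chars_count_singleton' (ch : Char) (l : List Char) :
    PySem.Chars.count l [ch] = l.count ch := by
  simp only [PySem.Chars.count, List.isEmpty_cons, if_false, Bool.false_eq_true]
  simpa using chars_count_singleton ch l l.length 0 (le_refl _)

lemma str_count_singleton (ch : Char) (s : String) :
    PySem.Str.count s (String.ofList [ch]) = s.toList.count ch := by
  rw [PySem.Str.count_eq]
  have : (String.ofList [ch]).toList = [ch] := by simp
  rw [this, chars_count_singleton']

-- part 1: A's fold equals count '(' minus count ')'
lemma part1_fold (l : List Char) (r : Int) :
    l.foldl (fun retval char =>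
      if char = '(' then retval + 1 else if char = ')' then retval - 1 else retval) r
      = r + (l.count '(' : Int) - (l.count ')' : Int) := by
  induction l generalizing r with
  | nil => simp
  | cons c t ih =>
    simp only [List.foldl_cons, ih, List.count_cons]
    by_cases h1 : c = '('
    · subst h1; simp; ring
    · by_cases h2 : c = ')'
      · subst h2; simp [h1]; ring
      · simp [h1, h2]

-- positions of a character, starting at offset n (proof-side view of B's comprehensions)
def posOf (ch : Char) : List Char → Int → List Int
  | [], _ => []
  | c :: t, n => if c = ch then n :: posOf ch t (n + 1) else posOf ch t (n + 1)

lemma filterMap_enumerate_eq_posOf (ch : Char) (l : List Char) (n : Int) :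
    (PySem.List.enumerate l n).filterMap
      (fun ic => if ic.2 = ch then some ic.1 else none) = posOf ch l n := by
  induction l generalizing n with
  | nil => simp [posOf, PySem.List.enumerate_nil]
  | cons c t ih =>
    by_cases hc : c = ch <;>
      simp [PySem.List.enumerate_cons, posOf, hc, ih]

lemma mem_posOf_ge (ch : Char) (t : List Char) (m x : Int)
    (h : x ∈ posOf ch t m) : m ≤ x := by
  induction t generalizing m with
  | nil => simp [posOf] at h
  | cons c r ih =>
    by_cases hc : c = ch
    · simp only [posOf, hc, reduceIte] at h
      rcases List.mem_cons.mp h with h | h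
      · omega
      · have := ih (m + 1) h; omega
    · simp only [posOf, if_neg hc] at h
      have := ih (m + 1) h; omega

-- the bridge: A's running-floor loop equals B's rank-pairing loop, over any consumed prefix
-- (P = positions of '(' already consumed, all < n; o = their number; c = closes consumed)
lemma bridge (t : List Char) (n : Int) (o c : Nat) (P : List Int)
    (hP : ∀ x ∈ P, x < n) (hPl : P.length = o) (hco : c ≤ o) :
    solveLoopA t n ((o : Int) - (c : Int))
      = altLoop (P ++ posOf '(' t n) (posOf ')' t n) c := by
  induction t generalizing n o c P with
  | nil => simp [solveLoopA, posOf, altLoop]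
  | cons ch t ih =>
    by_cases h1 : ch = '('
    · -- open: floor rises, never -1; B appends n to the consumed opens
      have hne : ¬ ((o : Int) - (c : Int) + 1 = -1) := by omega
      subst h1
      simp only [solveLoopA, posOf, reduceIte]
      rw [if_neg hne]
      have hstep : (o : Int) - (c : Int) + 1 = ((o + 1 : Nat) : Int) - (c : Int) := by
        push_cast; ring
      rw [hstep]
      have := ih (n + 1) (o + 1) c (P ++ [n])
        (by intro x hx; rcases List.mem_append.mp hx with hx | hx
            · exact lt_trans (hP x hx) (by omega)
            · simp at hx; omega)
        (by simp [hPl]) (by omega)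
      rw [this, List.append_assoc]
      simp
    · by_cases h2 : ch = ')'
      · -- close: B examines this close with index c against opens[c]
        subst h2
        simp only [solveLoopA, posOf, if_neg h1, reduceIte]
        by_cases heq : o = c
        · -- floor hits -1: B's guard fires (opens exhausted at rank c, or opens[c] > n)
          subst heq
          have hm1 : (o : Int) - (o : Int) - 1 = -1 := by ring
          rw [if_pos hm1]
          cases hQ : posOf '(' t (n + 1) with
          | nil =>
            simp only [List.append_nil, altLoop]
            rw [if_pos (show P.length ≤ o by omega)]
          | cons q Q =>
            have hlen : ¬ ((P ++ q :: Q).length ≤ o) := by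
              simp only [List.length_append, List.length_cons]; omega
            have hq : n < q := by
              have := mem_posOf_ge '(' t (n + 1) q (by rw [hQ]; exact List.mem_cons_self)
              omega
            have hget : (P ++ q :: Q).getD o 0 = q := by
              rw [List.getD, List.getElem?_append_right (by omega), hPl]
              simp
            simp only [altLoop]
            rw [if_neg hlen, hget, if_pos hq]
        · -- floor stays ≥ 0: B's guard fails (opens[c] is a consumed open, < n)
          have hco' : c < o := lt_of_le_of_ne hco (Ne.symm heq)
          have hne : ¬ ((o : Int) - (c : Int) - 1 = -1) := by omega
          rw [if_neg hne]
          have hlen : ¬ ((P ++ posOf '(' t (n + 1)).length ≤ c) := by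
            simp only [List.length_append]; omega
          have hget : (P ++ posOf '(' t (n + 1)).getD c 0 = P.getD c 0 := by
            rw [List.getD, List.getD, List.getElem?_append_left (by omega)]
          have hclt : c < P.length := by omega
          have hlt : ¬ (n < (P ++ posOf '(' t (n + 1)).getD c 0) := by
            rw [hget, List.getD_eq_getElem _ _ hclt]
            exact not_lt.mpr (le_of_lt (hP _ (List.getElem_mem hclt)))
          simp only [altLoop]
          rw [if_neg hlen, if_neg hlt]
          have hstep : (o : Int) - (c : Int) - 1 = (o : Int) - ((c + 1 : Nat) : Int) := by
            push_cast; ring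
          rw [hstep]
          exact ih (n + 1) o (c + 1) P
            (fun x hx => lt_trans (hP x hx) (by omega)) hPl (by omega)
      · -- other char: floor unchanged, both position lists skip it
        have hne : ¬ ((o : Int) - (c : Int) = -1) := by omega
        simp only [solveLoopA, posOf, if_neg h1, if_neg h2]
        rw [if_neg hne]
        exact ih (n + 1) o c P (fun x hx => lt_trans (hP x hx) (by omega)) hPl hco

-- ===== VERDICT (by name: the statement is the Claim_ definition above) =====
theorem solve_spec : Claim_equal_solve := by
  intro input_value part _
  unfold Spec_solve solve solve_alt
  by_cases hp : part = 1
  · have h1 : "(" = String.ofList ['('] := rfl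
    have h2 : ")" = String.ofList [')'] := rfl
    simp only [hp, h1, h2, str_count_singleton, part1_fold]
    simp
  · simp only [if_neg hp, filterMap_enumerate_eq_posOf]
    have := bridge input_value.toList 0 0 0 [] (by simp) rfl (le_refl 0)
    simpa using this
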